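-- pv_equiv track=rewrite | github.com/Pablofl0/Programacion | T2/Práctica/t02_10/exer4.2.0.py | programa
-- ===== SOURCE A (Python) =====
-- def validacion_entrante(n_entrante):
--     """Función que valida el número entrante.
--
--     Args:
--         n_entrante (int): número entrante.
--     Returns:
--         boolean: True o False.
--     """
--     if type(n_entrante) is not int:
--         return False
--     elif not(n_entrante>=0 and n_entrante<=1000):
--         return False
--     return True
--
-- def sustraendo(suma_e):
--     if suma_e <= 9:
--         sustraendo_final = suma_e
--     else:
--         sustraendo_final = 9
--     return sustraendo_final
--
-- def programa(n_entrante):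
--     """Función que calcula la solución.
--
--     Args:
--         n_entrante (int): número entrante.
--
--     Raises:
--         ValueError: si el valor es incorrecto.
--
--     Returns:
--         int: solución.
--     """
--     if not(validacion_entrante(n_entrante)):
--         raise ValueError
--     n_entrante_str = str(n_entrante)
--     suma_e = 0
--     for c in n_entrante_str:
--         suma_e = suma_e + int(c)
--     numero_calc = ''
--     while suma_e > 0:
--         sust = sustraendo(suma_e)
--         suma_e -= sust
--         numero_calc += str(sust)
--     numero_final = numero_calc[::-1]
--     return numero_final
-- ===== SOURCE B (Python) =====
-- def validacion_entrante(n_entrante):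
--     """Función que valida el número entrante."""
--     if type(n_entrante) is not int:
--         return False
--     elif not(n_entrante >= 0 and n_entrante <= 1000):
--         return False
--     return True
--
-- def programa(n_entrante):
--     """Digit sum of n, written as the minimal 9-greedy digit string."""
--     if not validacion_entrante(n_entrante):
--         raise ValueError
--     suma_e = sum(int(c) for c in str(n_entrante))
--     count, rem = divmod(suma_e, 9)
--     return ('' if rem == 0 else str(rem)) + '9' * count
-- ===== Notes on version B (the rewrite author's own statement) =====
-- stated objective: simpler
-- what changed: Replaces the subtract-9 while-loop plus string reversal with a closed form: divmod(digit_sum, 9) gives the count of 9s and the remainder digit directly.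
-- outside the precondition, e.g. on programa(-1): A raises ValueError, B raises ValueError; on programa(1001): A raises ValueError, B raises ValueError
import Mathlib
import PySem

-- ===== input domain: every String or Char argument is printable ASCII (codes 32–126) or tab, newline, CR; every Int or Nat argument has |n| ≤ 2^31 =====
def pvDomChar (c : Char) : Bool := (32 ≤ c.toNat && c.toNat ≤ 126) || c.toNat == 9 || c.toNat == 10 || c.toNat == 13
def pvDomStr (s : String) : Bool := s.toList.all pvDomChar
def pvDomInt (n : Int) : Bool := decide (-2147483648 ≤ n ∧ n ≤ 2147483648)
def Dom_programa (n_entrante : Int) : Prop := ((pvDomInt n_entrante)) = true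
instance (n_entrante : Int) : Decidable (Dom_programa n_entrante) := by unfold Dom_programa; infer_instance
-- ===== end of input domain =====

-- B replaces A's subtract-9 while-loop and final string reversal with a divmod closed form (simpler: no loop over the 9-chunks).


-- ===== PORT A =====
-- shared helper: int(c) for a single character c (both Source A and Source B apply int to the one-char strings of str(n));
-- never none on Pre_ inputs (all characters are digits), so getD 0 is unreachable
def intChar (c : Char) : Int := (PySem.Int.ofStr? (String.ofList [c])).getD 0

-- shared helper, identical in Source A and Source B; the 'type(...) is not int' branch is vacuous for Int inputs
def validacion_entrante (n_entrante : Int) : Bool :=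
  if ¬ (n_entrante ≥ 0 ∧ n_entrante ≤ 1000) then false else true

def sustraendo (suma_e : Int) : Int :=
  if suma_e ≤ 9 then suma_e else 9

-- A's while-loop: while suma_e > 0: sust = sustraendo(suma_e); suma_e -= sust; numero_calc += str(sust)
def programaLoop (suma_e : Int) (numero_calc : String) : String :=
  if h : suma_e > 0 then
    programaLoop (suma_e - sustraendo suma_e) (numero_calc ++ PySem.Int.toStr (sustraendo suma_e))
  else numero_calc
termination_by suma_e.toNat
decreasing_by simp only [sustraendo]; split <;> omega

def programa (n_entrante : Int) : String :=
  if !validacion_entrante n_entrante then ""  -- raise ValueError: excluded by Pre_programa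
  else
    let n_entrante_str := PySem.Int.toStr n_entrante
    let suma_e := n_entrante_str.toList.foldl (fun a c => a + intChar c) 0
    let numero_calc := programaLoop suma_e ""
    (PySem.Str.slice? numero_calc none none (-1)).getD ""  -- numero_calc[::-1]; step -1 ≠ 0, never none

-- ===== PORT B =====
def programa_alt (n_entrante : Int) : String :=
  if !validacion_entrante n_entrante then ""  -- raise ValueError: excluded by Pre_programa
  else
    let suma_e := ((PySem.Int.toStr n_entrante).toList.map intChar).sum
    let count := PySem.Int.floordiv suma_e 9
    let rem := PySem.Int.mod suma_e 9
    (if rem == 0 then "" else PySem.Int.toStr rem) ++ String.ofList (List.replicate count.toNat '9')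

-- ===== PRECONDITION & SPEC =====
-- exactly the inputs A accepts: outside 0 ≤ n ≤ 1000 A raises ValueError
def Pre_programa (n_entrante : Int) : Prop := 0 ≤ n_entrante ∧ n_entrante ≤ 1000
instance (n_entrante : Int) : Decidable (Pre_programa n_entrante) := by unfold Pre_programa; infer_instance
def pvWitness_programa : Int := (57)

def Spec_programa (n_entrante : Int) (out : String) : Prop := out = programa_alt n_entrante
instance (n_entrante : Int) (out : String) : Decidable (Spec_programa n_entrante out) := by unfold Spec_programa; infer_instance

-- ===== CLAIM (what is proved, stated in full; the proofs are below) =====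
def Claim_equal_programa : Prop := ∀ (n_entrante : Int), Dom_programa n_entrante → Pre_programa n_entrante → Spec_programa n_entrante (programa n_entrante)

-- ===== LEMMAS AND PROOFS =====

-- Python's floor-division/modulo by the positive constant 9 agree with Lean's euclidean ones
lemma fdiv9_eq (a : Int) : a.fdiv 9 = a / 9 := by
  rw [Int.fdiv_eq_ediv, if_pos (Or.inl (by norm_num))]; ring

lemma fmod9_eq (a : Int) : a.fmod 9 = a % 9 := by
  rw [Int.fmod_eq_emod, if_pos (Or.inl (by norm_num))]; ring

-- every character str produces for a nonnegative int is some digitChar d, d < 10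
lemma programaLoop_pos (s : Int) (acc : String) (h : s > 0) :
    programaLoop s acc = programaLoop (s - sustraendo s) (acc ++ PySem.Int.toStr (sustraendo s)) := by
  rw [programaLoop]; rw [dif_pos h]

lemma programaLoop_nonpos (s : Int) (acc : String) (h : ¬ s > 0) :
    programaLoop s acc = acc := by
  rw [programaLoop]; rw [dif_neg h]

lemma toDigits_shape : ∀ m : Nat, ∀ c ∈ Nat.toDigits 10 m, ∃ d : Nat, d < 10 ∧ c = Nat.digitChar d := by
  intro m
  induction m using Nat.strong_induction_on with
  | _ m ih =>
    intro c hc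
    rw [Nat.toDigits_eq_if (by omega)] at hc
    split at hc
    next h10 => simp at hc; exact ⟨m, h10, hc⟩
    next h10 =>
      rcases List.mem_append.mp hc with h | h
      · exact ih (m / 10) (by omega) c h
      · simp at h; exact ⟨m % 10, by omega, h⟩

lemma intChar_digitChar (d : Nat) (hd : d < 10) : intChar (Nat.digitChar d) = (d : Int) := by
  interval_cases d <;> decide

lemma digitSum_nonneg (m : Nat) : 0 ≤ ((Nat.toDigits 10 m).map intChar).sum := by
  apply List.sum_nonneg
  intro x hx
  obtain ⟨c, hc, rfl⟩ := List.mem_map.mp hx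
  obtain ⟨d, hd, rfl⟩ := toDigits_shape m c hc
  rw [intChar_digitChar d hd]
  exact Int.natCast_nonneg d

lemma foldl_add_intChar : ∀ (l : List Char) (a : Int),
    l.foldl (fun a c => a + intChar c) a = a + (l.map intChar).sum := by
  intro l
  induction l with
  | nil => simp
  | cons c t ih => intro a; simp [List.foldl_cons, ih, add_assoc]

lemma programaLoop_acc : ∀ (k : Nat) (s : Int) (acc : String), s.toNat ≤ k →
    programaLoop s acc = acc ++ programaLoop s "" := by
  intro k
  induction k with
  | zero =>
    intro s acc hs
    rw [programaLoop_nonpos s acc (by omega), programaLoop_nonpos s "" (by omega)]; simp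
  | succ k ih =>
    intro s acc hs
    by_cases h : s > 0
    · have hsu : 1 ≤ sustraendo s ∧ sustraendo s ≤ s := by
        simp only [sustraendo]; split <;> omega
      rw [programaLoop_pos s acc h, programaLoop_pos s "" h]
      rw [ih (s - sustraendo s) (acc ++ PySem.Int.toStr (sustraendo s)) (by omega),
          ih (s - sustraendo s) ("" ++ PySem.Int.toStr (sustraendo s)) (by omega)]
      simp [String.append_assoc]
    · rw [programaLoop_nonpos s acc h, programaLoop_nonpos s "" h]; simp

lemma programaLoop_eq : ∀ (k : Nat) (s : Int), s.toNat ≤ k → 0 ≤ s →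
    (programaLoop s "").toList =
      List.replicate (s.fdiv 9).toNat '9' ++
        (if s.fmod 9 = 0 then [] else PySem.Int.toChars (s.fmod 9)) := by
  intro k
  induction k with
  | zero =>
    intro s hs h0
    have : s = 0 := by omega
    subst this
    rw [programaLoop_nonpos 0 "" (by omega)]
    decide
  | succ k ih =>
    intro s hs h0
    by_cases h : s > 0
    · by_cases h9 : s ≤ 9
      · -- last chunk: sust = s, loop stops after one step
        have hsx : sustraendo s = s := by simp [sustraendo, h9]
        rw [programaLoop_pos s "" h, hsx, sub_self, programaLoop_nonpos 0 _ (by omega)]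
        interval_cases s <;> decide
      · -- sust = 9, peel one '9'
        have hsx : sustraendo s = 9 := by rw [sustraendo, if_neg (by omega)]
        rw [programaLoop_pos s "" h, hsx]
        rw [programaLoop_acc (s - 9).toNat _ _ le_rfl]
        have h1 : ("" ++ PySem.Int.toStr 9 : String) = String.ofList ['9'] := by decide
        rw [h1]
        have h2 : (s - 9).toNat ≤ k := by omega
        have h3 : (0:Int) ≤ s - 9 := by omega
        have hfd : (s - 9).fdiv 9 = s.fdiv 9 - 1 := by
          rw [fdiv9_eq, fdiv9_eq]; omega
        have hfm : (s - 9).fmod 9 = s.fmod 9 := by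
          rw [fmod9_eq, fmod9_eq]; omega
        have hcount : 1 ≤ s.fdiv 9 := by
          rw [fdiv9_eq]; omega
        simp only [String.toList_append, String.toList_ofList, ih _ h2 h3, hfd, hfm]
        have : (s.fdiv 9).toNat = ((s.fdiv 9 - 1).toNat) + 1 := by omega
        rw [this, List.replicate_succ]
        simp
    · have : s = 0 := by omega
      subst this
      rw [programaLoop_nonpos 0 "" (by omega)]
      decide

-- single-digit remainders: str is one character, so reversing it is the identity
lemma toChars_rev_single (r : Int) (h1 : 1 ≤ r) (h8 : r ≤ 8) :
    (PySem.Int.toChars r).reverse = PySem.Int.toChars r := by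
  interval_cases r <;> decide

-- ===== VERDICT (by name: the statement is the Claim_ definition above) =====
theorem programa_spec : Claim_equal_programa := by
  intro n _ hpre
  have h0 : 0 ≤ n := hpre.1
  have h1000 : n ≤ 1000 := hpre.2
  unfold Spec_programa programa programa_alt
  have hval : validacion_entrante n = true := by
    simp [validacion_entrante]; omega
  simp only [hval, Bool.not_true, Bool.false_eq_true, if_false]
  have hlist : (PySem.Int.toStr n).toList = Nat.toDigits 10 n.toNat := by
    rw [PySem.Int.toList_toStr, PySem.Int.toChars, if_neg (by omega)]
  rw [hlist, foldl_add_intChar, zero_add]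
  set S : Int := ((Nat.toDigits 10 n.toNat).map intChar).sum with hS
  have hS0 : 0 ≤ S := by rw [hS]; exact digitSum_nonneg n.toNat
  -- A's side: reverse of the loop string
  rw [PySem.Str.slice?_none_none_neg_one, Option.getD_some]
  rw [programaLoop_eq S.toNat S le_rfl hS0]
  -- B's side
  simp only [PySem.Int.floordiv, PySem.Int.mod]
  have hrem : 0 ≤ S.fmod 9 ∧ S.fmod 9 ≤ 8 := by rw [fmod9_eq]; omega
  by_cases hr : S.fmod 9 = 0
  · simp [hr, List.reverse_replicate]
  · have hbeq : (S.fmod 9 == 0) = false := by simp [hr]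
    rw [if_neg hr, hbeq]
    simp only [Bool.false_eq_true, if_false]
    rw [List.reverse_append, List.reverse_replicate]
    rw [toChars_rev_single _ (by omega) (by omega)]
    rw [PySem.Int.toStr, ← String.ofList_append]
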